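-- pv_equiv track=rewrite | github.com/phatakshaunak/scaler_academy | DSA/Problem_Solving_5/xor_queries.py | solve
-- ===== SOURCE A (Python) =====
-- def solve(A, B):
--
--     M = len(A)
--     N = len(B)
--
--     ans = [[] for i in range(N)]
--
--     # Build prefix sum array
--
--     ps_a = [0 for g in range(M+1)]
--
--     for idx in range(M):
--
--         ps_a[idx+1] = ps_a[idx] + A[idx]
--
--     for q_i in range(N):
--
--         #Left and right indices (Subtract one as input indices are 1-based, i.e. array starts at 1)
--         q_l = B[q_i][0] - 1
--         q_r = B[q_i][1] - 1
--
--         #Subarray length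
--         sa_len = q_r - q_l + 1
--         q_sum = ps_a[q_r+1] - ps_a[q_l]
--
--         # XOR is zero if even number of ones in the sub-array
--         if q_sum % 2 == 0:
--             ans[q_i].append(0)
--             ans[q_i].append((sa_len - q_sum))
--
--         # XOR is one if odd number of ones in the sub-array
--         else:
--             ans[q_i].append(1)
--             ans[q_i].append((sa_len - q_sum))
--
--     return ans
-- ===== SOURCE B (Python) =====
-- def solve(A, B):
--     # Alternative: closed-form prefix values (per-index slice sums, no running
--     # accumulation) and branch-free answers built directly from cnt % 2.
--     ps = [sum(A[:i]) for i in range(len(A) + 1)]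
--     res = []
--     for q in B:
--         cnt = ps[q[1]] - ps[q[0] - 1]
--         res.append([cnt % 2, (q[1] - q[0] + 1) - cnt])
--     return res
-- ===== Notes on version B (the rewrite author's own statement) =====
-- stated objective: alternative
-- what changed: Replaces the running-accumulation build of the prefix array (index loop with in-place assignment) by closed-form per-index slice sums, and replaces the parity if/else by branch-free construction of [cnt % 2, length - cnt].
import Mathlib
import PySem

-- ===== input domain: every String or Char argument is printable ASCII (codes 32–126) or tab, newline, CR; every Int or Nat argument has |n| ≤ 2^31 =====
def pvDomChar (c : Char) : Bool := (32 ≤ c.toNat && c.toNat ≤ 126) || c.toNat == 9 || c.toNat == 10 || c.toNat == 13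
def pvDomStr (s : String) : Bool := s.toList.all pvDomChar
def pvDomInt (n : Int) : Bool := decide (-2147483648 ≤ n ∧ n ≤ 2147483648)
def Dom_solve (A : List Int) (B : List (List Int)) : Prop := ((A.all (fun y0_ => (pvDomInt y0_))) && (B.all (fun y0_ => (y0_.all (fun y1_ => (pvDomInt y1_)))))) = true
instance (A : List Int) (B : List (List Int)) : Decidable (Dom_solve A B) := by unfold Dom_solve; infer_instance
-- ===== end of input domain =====

-- B builds the prefix values by closed-form per-index slice sums instead of A's running
-- accumulation into a preallocated array, and emits [cnt % 2, length - cnt] without a branch.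
-- ===== PORT A =====
-- the prefix-sum array ps_a: 'for idx in range(M): ps_a[idx+1] = ps_a[idx] + A[idx]'
def pvPs (A : List Int) : List Int :=
  (PySem.List.pyRange 0 (A.length : Int) 1).foldl
    (fun ps idx => PySem.List.pySetD ps (idx + 1)
      (PySem.List.pyGetD ps idx 0 + PySem.List.pyGetD A idx 0))
    (List.replicate (A.length + 1) 0)

def solve (A : List Int) (B : List (List Int)) : List (List Int) :=
  -- 'for q_i in range(N): …' filling ans[q_i] with [parity, sa_len - q_sum]
  B.map (fun q =>
    match PySem.List.pyGet? q 0, PySem.List.pyGet? q 1 with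
    | some b0, some b1 =>
      match PySem.List.pyGet? (pvPs A) (b1 - 1 + 1), PySem.List.pyGet? (pvPs A) (b0 - 1) with
      | some pr, some pl =>
        if PySem.Int.mod (pr - pl) 2 = 0
        then [0, (b1 - 1) - (b0 - 1) + 1 - (pr - pl)]
        else [1, (b1 - 1) - (b0 - 1) + 1 - (pr - pl)]
      | _, _ => []   -- IndexError, outside Pre_solve
    | _, _ => [])    -- IndexError, outside Pre_solve

-- ===== PORT B =====
-- 'ps = [sum(A[:i]) for i in range(len(A) + 1)]'
def pvPsAlt (A : List Int) : List Int :=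
  (List.range (A.length + 1)).map (fun (i : Nat) => (PySem.List.slice A none (some (i : Int))).sum)

def solve_alt (A : List Int) (B : List (List Int)) : List (List Int) :=
  B.map (fun q =>
    match PySem.List.pyGet? q 1 with
    | none => []       -- IndexError, outside Pre_solve
    | some b1 =>
      match PySem.List.pyGet? q 0 with
      | none => []     -- IndexError, outside Pre_solve
      | some b0 =>
        match PySem.List.pyGet? (pvPsAlt A) b1 with
        | none => []   -- IndexError, outside Pre_solve
        | some pr =>
          match PySem.List.pyGet? (pvPsAlt A) (b0 - 1) with
          | none => [] -- IndexError, outside Pre_solve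
          | some pl => [PySem.Int.mod (pr - pl) 2, b1 - b0 + 1 - (pr - pl)])

-- ===== PRECONDITION & SPEC =====
-- Pre_solve is exactly the inputs on which the Python A returns normally: every query has at
-- least two entries and both decoded indices into the length-(len(A)+1) prefix array are in
-- Python's indexing range (negative wraparound included); outside it A raises IndexError.
def Pre_solve (A : List Int) (B : List (List Int)) : Prop :=
  ∀ q ∈ B, 2 ≤ q.length ∧ PySem.Raise.InRange (A.length + 1) (q.getD 1 0) ∧
    PySem.Raise.InRange (A.length + 1) (q.getD 0 0 - 1)
instance (A : List Int) (B : List (List Int)) : Decidable (Pre_solve A B) := by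
  unfold Pre_solve; infer_instance
def pvWitness_solve : List Int × List (List Int) := ([1, 0, 1], [[1, 2], [2, 3], [1, 3]])

def Spec_solve (A : List Int) (B : List (List Int)) (out : List (List Int)) : Prop := out = solve_alt A B
instance (A : List Int) (B : List (List Int)) (out : List (List Int)) : Decidable (Spec_solve A B out) := by unfold Spec_solve; infer_instance

-- ===== CLAIM (what is proved, stated in full; the proofs are below) =====
def Claim_equal_solve : Prop := ∀ (A : List Int) (B : List (List Int)), Dom_solve A B → Pre_solve A B → Spec_solve A B (solve A B)

-- ===== LEMMAS AND PROOFS =====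

lemma pv_set_append_len (xs ys : List Int) (y v : Int) :
    (xs ++ y :: ys).set xs.length v = xs ++ v :: ys := by
  induction xs with
  | nil => rfl
  | cons a xs ih => simp [ih]

lemma pv_ps_aux (A : List Int) (k : Nat) (hk : k ≤ A.length) :
    (List.range k).foldl
      (fun ps n => ps.set (n + 1) (ps.getD n 0 + A.getD n 0))
      (List.replicate (A.length + 1) (0 : Int))
    = (List.range (k + 1)).map (fun i => ((A.take i).sum : Int))
      ++ List.replicate (A.length - k) 0 := by
  induction k with
  | zero => simp [List.replicate_succ]
  | succ k ih =>
    have hk' : k ≤ A.length := Nat.le_of_succ_le hk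
    have hkM : k < A.length := hk
    rw [List.range_succ, List.foldl_append, ih hk']
    have hlen : ((List.range (k + 1)).map (fun i => ((A.take i).sum : Int))).length = k + 1 := by
      simp
    have hget : ((List.range (k + 1)).map (fun i => ((A.take i).sum : Int))
        ++ List.replicate (A.length - k) (0 : Int)).getD k 0 = (A.take k).sum := by
      rw [List.getD_eq_getElem?_getD,
        List.getElem?_append_left (by simp only [List.length_map, List.length_range]; omega)]
      simp
    have hrep : List.replicate (A.length - k) (0 : Int)
        = 0 :: List.replicate (A.length - (k + 1)) 0 := by
      have h : A.length - k = (A.length - (k + 1)) + 1 := by omega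
      rw [h, List.replicate_succ]
    have hAget : A.getD k 0 = A[k] := List.getD_eq_getElem A 0 hkM
    simp only [List.foldl_cons, List.foldl_nil]
    rw [hget, hAget, hrep]
    have hset := pv_set_append_len ((List.range (k + 1)).map (fun i => ((A.take i).sum : Int)))
      (List.replicate (A.length - (k + 1)) 0) 0 ((A.take k).sum + A[k])
    rw [hlen] at hset
    rw [hset, show List.range (k + 1 + 1) = List.range (k + 1) ++ [k + 1] from List.range_succ,
      List.map_append]
    have hsum : (A.take (k + 1)).sum = (A.take k).sum + A[k] := List.sum_take_succ A k hkM
    simp [hsum]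

lemma pv_ps_eq (A : List Int) :
    pvPs A = (List.range (A.length + 1)).map (fun i => ((A.take i).sum : Int)) := by
  unfold pvPs
  rw [PySem.List.pyRange_zero_nat, List.foldl_map]
  have hf : (fun (ps : List Int) (n : Nat) =>
      PySem.List.pySetD ps ((n : Int) + 1)
        (PySem.List.pyGetD ps (n : Int) 0 + PySem.List.pyGetD A (n : Int) 0))
      = fun ps n => ps.set (n + 1) (ps.getD n 0 + A.getD n 0) := by
    funext ps n
    have h1 : ((n : Int) + 1) = ((n + 1 : Nat) : Int) := by push_cast; ring
    rw [h1, PySem.List.pySetD_natCast, PySem.List.pyGetD_natCast, PySem.List.pyGetD_natCast]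
  rw [hf]
  have h := pv_ps_aux A A.length le_rfl
  simpa using h

lemma pv_psAlt_eq (A : List Int) :
    pvPsAlt A = (List.range (A.length + 1)).map (fun i => ((A.take i).sum : Int)) := by
  unfold pvPsAlt
  apply List.map_congr_left
  intro i _
  rw [PySem.List.slice_to_natCast]

lemma pv_mod_two (x : Int) : PySem.Int.mod x 2 = 0 ∨ PySem.Int.mod x 2 = 1 := by
  have h1 := PySem.Int.mod_nonneg x (b := 2) (by omega)
  have h2 := PySem.Int.mod_lt x (b := 2) (by omega)
  omega

-- ===== VERDICT (by name: the statement is the Claim_ definition above) =====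
theorem solve_spec : Claim_equal_solve := by
  intro A B _hdom _hpre
  show solve A B = solve_alt A B
  unfold solve solve_alt
  rw [pv_ps_eq, pv_psAlt_eq]
  apply List.map_congr_left
  intro q _hq
  cases h0 : PySem.List.pyGet? q 0 with
  | none => cases h1 : PySem.List.pyGet? q 1 <;> rfl
  | some b0 =>
    cases h1 : PySem.List.pyGet? q 1 with
    | none => rfl
    | some b1 =>
      simp only []
      have e1 : b1 - (1 : Int) + 1 = b1 := by ring
      rw [e1]
      cases hr : PySem.List.pyGet?
          ((List.range (A.length + 1)).map (fun i => ((A.take i).sum : Int))) b1 with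
      | none =>
        cases hl : PySem.List.pyGet?
            ((List.range (A.length + 1)).map (fun i => ((A.take i).sum : Int))) (b0 - 1) <;> rfl
      | some pr =>
        cases hl : PySem.List.pyGet?
            ((List.range (A.length + 1)).map (fun i => ((A.take i).sum : Int))) (b0 - 1) with
        | none => rfl
        | some pl =>
          have eX : b1 - (1 : Int) - (b0 - (1 : Int)) + 1 = b1 - b0 + 1 := by ring
          rw [eX]
          simp only []
          rcases pv_mod_two (pr - pl) with h | h <;> rw [h] <;> norm_num
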